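-- pv_equiv track=rewrite | github.com/Rommagcom/smartai | scripts/smoke_worker_queue.py | _remove_from_right
-- ===== SOURCE A (Python) =====
-- def _remove_from_right(queue: list[str], value: str, count: int) -> tuple[int, list[str]]:
--     removed = 0
--     reversed_items = list(reversed(queue))
--     retained_reversed: list[str] = []
--     remaining = count
--     for item in reversed_items:
--         if item == value and remaining > 0:
--             removed += 1
--             remaining -= 1
--             continue
--         retained_reversed.append(item)
--     return removed, list(reversed(retained_reversed))
-- ===== SOURCE B (Python) =====
-- def _remove_from_right(queue: list[str], value: str, count: int) -> tuple[int, list[str]]: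
--     total = queue.count(value)
--     to_remove = max(0, min(count, total))
--     keep = total - to_remove
--     result: list[str] = []
--     kept = 0
--     for item in queue:
--         if item == value:
--             if kept < keep:
--                 kept += 1
--                 result.append(item)
--         else:
--             result.append(item)
--     return to_remove, result
-- ===== Notes on version B (the rewrite author's own statement) =====
-- stated objective: simpler
-- what changed: B computes the removal count up front from queue.count(value) and does a single forward pass keeping the leftmost total-to_remove occurrences, instead of A's reverse-filter-reverse with a mutable budget.
import Mathlib
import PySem

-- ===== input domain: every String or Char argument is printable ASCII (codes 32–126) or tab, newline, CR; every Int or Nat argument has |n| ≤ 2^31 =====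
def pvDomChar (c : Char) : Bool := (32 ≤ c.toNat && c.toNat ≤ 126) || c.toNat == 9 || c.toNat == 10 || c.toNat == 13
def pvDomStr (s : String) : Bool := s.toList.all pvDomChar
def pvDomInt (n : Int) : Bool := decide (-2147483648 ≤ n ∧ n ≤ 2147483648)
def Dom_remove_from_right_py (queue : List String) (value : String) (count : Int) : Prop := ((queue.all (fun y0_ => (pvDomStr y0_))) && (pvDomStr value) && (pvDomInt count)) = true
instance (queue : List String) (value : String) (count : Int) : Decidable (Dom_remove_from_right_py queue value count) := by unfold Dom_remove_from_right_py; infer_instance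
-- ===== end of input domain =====

-- B replaces A's reverse-filter-reverse with a precomputed removal count and one
-- forward pass keeping the leftmost occurrences (objective: simpler).

-- ===== PORT A =====
-- state: (removed, remaining, retained_reversed), exactly A's loop over the reversed list
def remove_from_right_py (queue : List String) (value : String) (count : Int) : Int × List String :=
  let reversed_items := queue.reverse
  let st := reversed_items.foldl
    (fun (s : Int × Int × List String) item =>
      if item == value ∧ s.2.1 > 0 then (s.1 + 1, s.2.1 - 1, s.2.2)
      else (s.1, s.2.1, s.2.2 ++ [item]))
    (0, count, [])
  (st.1, st.2.2.reverse)

-- ===== PORT B =====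
-- state: (kept, result), one forward pass; to_remove computed up front
def remove_from_right_py_alt (queue : List String) (value : String) (count : Int) : Int × List String :=
  let total : Int := (PySem.List.count queue value : Int)
  let to_remove := max 0 (min count total)
  let keep := total - to_remove
  let st := queue.foldl
    (fun (s : Int × List String) item =>
      if item == value then
        (if s.1 < keep then (s.1 + 1, s.2 ++ [item]) else s)
      else (s.1, s.2 ++ [item]))
    ((0 : Int), ([] : List String))
  (to_remove, st.2)

-- ===== PRECONDITION & SPEC =====
def Spec_remove_from_right_py (queue : List String) (value : String) (count : Int) (out : Int × List String) : Prop := out = remove_from_right_py_alt queue value count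
instance (queue : List String) (value : String) (count : Int) (out : Int × List String) : Decidable (Spec_remove_from_right_py queue value count out) := by unfold Spec_remove_from_right_py; infer_instance

-- ===== CLAIM (what is proved, stated in full; the proofs are below) =====
def Claim_equal_remove_from_right_py : Prop := ∀ (queue : List String) (value : String) (count : Int), Dom_remove_from_right_py queue value count → Spec_remove_from_right_py queue value count (remove_from_right_py queue value count)

-- ===== LEMMAS AND PROOFS =====

-- number of value-matches consumed from a budget m (shared by both loops)
def bcF (value : String) : List String → Int → Int
  | [], _ => 0
  | x :: xs, m => if x == value ∧ 0 < m then 1 + bcF value xs (m - 1) else bcF value xs m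

-- elements RETAINED (in traversal order) by A's skipping loop with budget m
def skipF (value : String) : List String → Int → List String
  | [], _ => []
  | x :: xs, m => if x == value ∧ 0 < m then skipF value xs (m - 1) else x :: skipF value xs m

-- elements kept by B's loop: keep matches while budget m lasts, keep all non-matches
def keepF (value : String) : List String → Int → List String
  | [], _ => []
  | x :: xs, m =>
    if x == value then
      (if 0 < m then x :: keepF value xs (m - 1) else keepF value xs m)
    else x :: keepF value xs m

theorem bcF_eq (value : String) (xs : List String) : ∀ m : Int,
    bcF value xs m = max 0 (min m ((List.count value xs : Int))) := by
  induction xs with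
  | nil => intro m; simp [bcF]
  | cons x xs ih =>
    intro m
    by_cases hx : x == value
    · by_cases hm : (0 : Int) < m
      · simp [bcF, hx, hm, ih, List.count_cons, (beq_iff_eq ..).1 hx]
        omega
      · simp [bcF, hx, hm, ih, List.count_cons, (beq_iff_eq ..).1 hx]
        omega
    · simp [bcF, hx, ih, List.count_cons, hx]

theorem keepF_append (value : String) (ys zs : List String) : ∀ k : Int,
    keepF value (ys ++ zs) k = keepF value ys k ++ keepF value zs (k - bcF value ys k) := by
  induction ys with
  | nil => intro k; simp [keepF, bcF]
  | cons y ys ih =>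
    intro k
    by_cases hy : y == value
    · by_cases hk : (0 : Int) < k
      · simp only [List.cons_append, keepF, bcF, hy, hk, if_pos, and_self, if_true, ih]
        rw [show k - (1 + bcF value ys (k - 1)) = k - 1 - bcF value ys (k - 1) by ring]
      · simp only [List.cons_append, keepF, bcF, hy, hk, if_false, if_true, ih]
        simp [hk]
    · simp only [List.cons_append, keepF, bcF, hy, if_false, ih]
      simp [hy]

theorem keepF_all (value : String) (ys : List String) : ∀ k : Int,
    ((List.count value ys : Int)) ≤ k → keepF value ys k = ys := by
  induction ys with
  | nil => intro k _; simp [keepF]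
  | cons y ys ih =>
    intro k hk
    by_cases hy : y == value
    · have hc : List.count value (y :: ys) = List.count value ys + 1 := by
        simp [List.count_cons, (beq_iff_eq ..).1 hy]
      rw [hc] at hk; push_cast at hk
      have h0 : (0 : Int) < k := by
        have : (0 : Int) ≤ (List.count value ys : Int) := by positivity
        omega
      simp [keepF, hy, h0, ih (k - 1) (by omega)]
    · have hc : List.count value (y :: ys) = List.count value ys := by
        simp [List.count_cons, hy]
      rw [hc] at hk
      simp [keepF, hy, ih k hk]

theorem skipF_reverse (value : String) (xs : List String) : ∀ m : Int,
    (skipF value xs m).reverse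
      = keepF value xs.reverse ((List.count value xs : Int) - bcF value xs m) := by
  induction xs with
  | nil => intro m; simp [skipF, keepF]
  | cons x xs ih =>
    intro m
    have hbnd : ∀ m' : Int, 0 ≤ bcF value xs m' ∧ bcF value xs m' ≤ (List.count value xs : Int) := by
      intro m'; rw [bcF_eq]
      constructor <;> omega
    have hrevcnt : List.count value xs.reverse = List.count value xs := List.count_reverse ..
    by_cases hx : x == value
    · have hcnt : List.count value (x :: xs) = List.count value xs + 1 := by
        simp [List.count_cons, (beq_iff_eq ..).1 hx]
      by_cases hm : (0 : Int) < m
      · -- x is removed by A; budgets shift by one and the tail element is not kept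
        have hb := hbnd (m - 1)
        have hbc : bcF value xs.reverse ((List.count value xs : Int) - bcF value xs (m - 1))
            = (List.count value xs : Int) - bcF value xs (m - 1) := by
          rw [bcF_eq, hrevcnt]; omega
        rw [show skipF value (x :: xs) m = skipF value xs (m - 1) by
          simp only [skipF]; rw [if_pos ⟨hx, hm⟩]]
        rw [ih (m - 1)]
        rw [show (x :: xs).reverse = xs.reverse ++ [x] by simp]
        rw [keepF_append]
        rw [show bcF value (x :: xs) m = 1 + bcF value xs (m - 1) by
          simp only [bcF]; rw [if_pos ⟨hx, hm⟩]]
        rw [hcnt]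
        push_cast
        rw [show (List.count value xs : Int) + 1 - (1 + bcF value xs (m - 1))
            = (List.count value xs : Int) - bcF value xs (m - 1) by ring]
        rw [hbc]
        simp [keepF, hx]
      · -- m exhausted: A keeps x; both sides keep the whole tail
        have hbc0 : bcF value xs m = 0 := by rw [bcF_eq]; omega
        rw [show skipF value (x :: xs) m = x :: skipF value xs m by
          simp only [skipF]; rw [if_neg (fun hc => hm hc.2)]]
        rw [show (x :: skipF value xs m).reverse = (skipF value xs m).reverse ++ [x] by simp]
        rw [ih m, hbc0]
        rw [show (x :: xs).reverse = xs.reverse ++ [x] by simp]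
        rw [keepF_append]
        rw [show bcF value (x :: xs) m = bcF value xs m by
          simp only [bcF]; rw [if_neg (fun hc => hm hc.2)], hbc0]
        rw [hcnt]
        push_cast
        have hbc : bcF value xs.reverse ((List.count value xs : Int) + 1 - 0)
            = (List.count value xs : Int) := by
          rw [bcF_eq, hrevcnt]; omega
        rw [hbc]
        rw [keepF_all value xs.reverse ((List.count value xs : Int) - 0) (by rw [hrevcnt]; omega)]
        rw [keepF_all value xs.reverse ((List.count value xs : Int) + 1 - 0) (by rw [hrevcnt]; omega)]
        simp [keepF, hx]
    · have hcnt : List.count value (x :: xs) = List.count value xs := by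
        simp [List.count_cons, hx]
      have hb := hbnd m
      rw [show skipF value (x :: xs) m = x :: skipF value xs m by simp [skipF, hx]]
      rw [show (x :: skipF value xs m).reverse = (skipF value xs m).reverse ++ [x] by simp]
      rw [ih m]
      rw [show (x :: xs).reverse = xs.reverse ++ [x] by simp]
      rw [keepF_append]
      rw [show bcF value (x :: xs) m = bcF value xs m by simp [bcF, hx], hcnt]
      simp [keepF, hx]

theorem foldlA_eq (value : String) (xs : List String) : ∀ (rm rem : Int) (acc : List String),
    List.foldl
      (fun (s : Int × Int × List String) item =>
        if item == value ∧ s.2.1 > 0 then (s.1 + 1, s.2.1 - 1, s.2.2)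
        else (s.1, s.2.1, s.2.2 ++ [item]))
      (rm, rem, acc) xs
      = (rm + bcF value xs rem, rem - bcF value xs rem, acc ++ skipF value xs rem) := by
  induction xs with
  | nil => intro rm rem acc; simp [bcF, skipF]
  | cons x xs ih =>
    intro rm rem acc
    by_cases h : x == value ∧ rem > 0
    · show List.foldl _
        (if x == value ∧ rem > 0 then (rm + 1, rem - 1, acc) else (rm, rem, acc ++ [x])) xs = _
      rw [if_pos h, ih]
      rw [show bcF value (x :: xs) rem = 1 + bcF value xs (rem - 1) by
        simp only [bcF]; rw [if_pos ⟨h.1, h.2⟩]]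
      rw [show skipF value (x :: xs) rem = skipF value xs (rem - 1) by
        simp only [skipF]; rw [if_pos ⟨h.1, h.2⟩]]
      refine congrArg₂ Prod.mk (by ring) (congrArg₂ Prod.mk (by ring) rfl)
    · show List.foldl _
        (if x == value ∧ rem > 0 then (rm + 1, rem - 1, acc) else (rm, rem, acc ++ [x])) xs = _
      rw [if_neg h, ih]
      rw [show bcF value (x :: xs) rem = bcF value xs rem by
        simp only [bcF]; rw [if_neg h]]
      rw [show skipF value (x :: xs) rem = x :: skipF value xs rem by
        simp only [skipF]; rw [if_neg h]]
      simp

theorem foldlB_eq (value : String) (keep : Int) (xs : List String) : ∀ (c : Int) (acc : List String),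
    List.foldl
      (fun (s : Int × List String) item =>
        if item == value then
          (if s.1 < keep then (s.1 + 1, s.2 ++ [item]) else s)
        else (s.1, s.2 ++ [item]))
      (c, acc) xs
      = (c + bcF value xs (keep - c), acc ++ keepF value xs (keep - c)) := by
  induction xs with
  | nil => intro c acc; simp [bcF, keepF]
  | cons x xs ih =>
    intro c acc
    by_cases hx : x == value
    · show List.foldl _
        (if x == value then (if c < keep then (c + 1, acc ++ [x]) else (c, acc))
         else (c, acc ++ [x])) xs = _
      rw [if_pos hx]
      by_cases hc : c < keep
      · have h0 : (0 : Int) < keep - c := by omega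
        rw [if_pos hc, ih]
        rw [show bcF value (x :: xs) (keep - c) = 1 + bcF value xs (keep - c - 1) by
          simp only [bcF]; rw [if_pos ⟨hx, h0⟩]]
        rw [show keepF value (x :: xs) (keep - c) = x :: keepF value xs (keep - c - 1) by
          simp only [keepF]; rw [if_pos hx, if_pos h0]]
        rw [show keep - (c + 1) = keep - c - 1 by ring]
        refine congrArg₂ Prod.mk (by ring) (by simp)
      · have h0 : ¬ (0 : Int) < keep - c := by omega
        rw [if_neg hc, ih]
        rw [show bcF value (x :: xs) (keep - c) = bcF value xs (keep - c) by
          simp only [bcF]; rw [if_neg (fun hp => h0 hp.2)]]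
        rw [show keepF value (x :: xs) (keep - c) = keepF value xs (keep - c) by
          simp only [keepF]; rw [if_pos hx, if_neg h0]]
    · show List.foldl _
        (if x == value then (if c < keep then (c + 1, acc ++ [x]) else (c, acc))
         else (c, acc ++ [x])) xs = _
      rw [if_neg (by simpa using hx), ih]
      rw [show bcF value (x :: xs) (keep - c) = bcF value xs (keep - c) by
        simp only [bcF]; rw [if_neg (fun hp => hx hp.1)]]
      rw [show keepF value (x :: xs) (keep - c) = x :: keepF value xs (keep - c) by
        simp only [keepF]; rw [if_neg (by simpa using hx)]]
      simp

-- ===== VERDICT (by name: the statement is the Claim_ definition above) =====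
theorem remove_from_right_py_spec : Claim_equal_remove_from_right_py := by
  intro queue value count _
  show ((List.foldl
      (fun (s : Int × Int × List String) item =>
        if item == value ∧ s.2.1 > 0 then (s.1 + 1, s.2.1 - 1, s.2.2)
        else (s.1, s.2.1, s.2.2 ++ [item])) (0, count, []) queue.reverse).1,
     (List.foldl
      (fun (s : Int × Int × List String) item =>
        if item == value ∧ s.2.1 > 0 then (s.1 + 1, s.2.1 - 1, s.2.2)
        else (s.1, s.2.1, s.2.2 ++ [item])) (0, count, []) queue.reverse).2.2.reverse)
    = (max 0 (min count ((PySem.List.count queue value : Int))),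
       (List.foldl
        (fun (s : Int × List String) item =>
          if item == value then
            (if s.1 < ((PySem.List.count queue value : Int)
                - max 0 (min count ((PySem.List.count queue value : Int))))
             then (s.1 + 1, s.2 ++ [item]) else s)
          else (s.1, s.2 ++ [item])) ((0 : Int), ([] : List String)) queue).2)
  rw [foldlA_eq, foldlB_eq]
  have hrevcnt : List.count value queue.reverse = List.count value queue := List.count_reverse ..
  have hbc : bcF value queue.reverse count
      = max 0 (min count ((PySem.List.count queue value : Int))) := by
    rw [bcF_eq, hrevcnt, PySem.List.count_eq]
  refine congrArg₂ Prod.mk (by simpa using hbc) ?_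
  rw [List.nil_append, List.nil_append, skipF_reverse, List.reverse_reverse, hrevcnt, hbc]
  rw [PySem.List.count_eq]
  refine congrArg (keepF value queue) (by ring)
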